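-- pv_equiv track=rewrite | github.com/HWCloudEngine/conveyor-dashboard | conveyordashboard/topology/topology.py | _truncate_type
-- ===== SOURCE A (Python) =====
-- def _truncate_type(type_str, num_of_chars):
--     if len(type_str) < num_of_chars:
--         return type_str
--     else:
--         parts = type_str.split('.')
--         type_str, type_len = parts[-1], len(parts[-1])
--         for part in reversed(parts[:-1]):
--             if type_len + len(part) + 1 > num_of_chars:
--                 return '...' + type_str
--             else:
--                 type_str = part + '.' + type_str
--                 type_len += len(part) + 1
--         return type_str
-- ===== SOURCE B (Python) =====
-- def _truncate_type(type_str, num_of_chars):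
--     if len(type_str) < num_of_chars:
--         return type_str
--     L = len(type_str)
--     if L <= num_of_chars:
--         return type_str
--     # a suffix starting at position q fits iff L - q <= num_of_chars, i.e. q >= L - num_of_chars;
--     # candidate starts are 0 and d+1 for every dot d, so the best cut is the first dot at index >= L - num_of_chars - 1
--     d = type_str.find('.', L - num_of_chars - 1)
--     if d < 0:
--         # nothing fits: keep the last component unconditionally
--         d = type_str.rfind('.')
--         if d < 0:
--             return type_str
--     return '...' + type_str[d + 1:]
-- ===== Notes on version B (the rewrite author's own statement) =====
-- stated objective: alternative
-- what changed: B does not split the string and has no loop over components: a suffix starting at position q fits iff q >= len - num_of_chars, so B locates the cut directly with one str.find for the first dot past that bound (falling back to str.rfind for the always-kept last component) and slices the original string once.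
import Mathlib
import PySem

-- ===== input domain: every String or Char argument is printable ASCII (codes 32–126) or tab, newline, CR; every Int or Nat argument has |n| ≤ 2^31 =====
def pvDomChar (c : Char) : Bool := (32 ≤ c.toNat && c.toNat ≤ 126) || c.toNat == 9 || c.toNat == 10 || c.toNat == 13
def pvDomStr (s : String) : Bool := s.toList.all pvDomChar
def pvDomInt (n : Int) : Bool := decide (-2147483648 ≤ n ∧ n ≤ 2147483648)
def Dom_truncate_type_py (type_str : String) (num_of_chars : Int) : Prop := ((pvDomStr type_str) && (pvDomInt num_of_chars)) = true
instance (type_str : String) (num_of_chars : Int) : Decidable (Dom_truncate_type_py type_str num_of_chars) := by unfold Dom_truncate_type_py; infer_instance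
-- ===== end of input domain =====

-- B never splits the string or loops over components: it locates the cut with one
-- str.find (first dot whose suffix fits) / rfind fallback and slices once (objective: alternative).


-- ===== PORT A =====
-- the for-loop over reversed(parts[:-1]) with early return '...' + type_str
def pvALoop (n : Int) : List String → String → Int → String
  | [], s, _ => s
  | p :: rest, s, tl =>
    if tl + PySem.Str.len p + 1 > n then "..." ++ s
    else pvALoop n rest (p ++ "." ++ s) (tl + PySem.Str.len p + 1)

def truncate_type_py (type_str : String) (num_of_chars : Int) : String :=
  if PySem.Str.len type_str < num_of_chars then type_str
  else
    -- parts = type_str.split('.'); sep is the nonempty literal ".", so split? is always some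
    let parts := (PySem.Str.split? type_str ".").getD []
    -- type_str, type_len = parts[-1], len(parts[-1])  (split never yields [], so pyGet? is some)
    let s0 := (PySem.List.pyGet? parts (-1)).getD ""
    pvALoop num_of_chars (PySem.List.slice parts none (some (-1))).reverse s0 (PySem.Str.len s0)

-- ===== PORT B =====
def truncate_type_py_alt (type_str : String) (num_of_chars : Int) : String :=
  if PySem.Str.len type_str < num_of_chars then type_str
  else
    let L := PySem.Str.len type_str
    if L ≤ num_of_chars then type_str
    else
      -- d = type_str.find('.', L - num_of_chars - 1)
      let d := PySem.Str.findFrom type_str "." (L - num_of_chars - 1)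
      if d < 0 then
        -- d = type_str.rfind('.')
        let d2 := PySem.Str.rfind type_str "."
        if d2 < 0 then type_str
        else "..." ++ PySem.Str.slice type_str (some (d2 + 1)) none
      else "..." ++ PySem.Str.slice type_str (some (d + 1)) none

-- ===== PRECONDITION & SPEC =====
def Spec_truncate_type_py (type_str : String) (num_of_chars : Int) (out : String) : Prop := out = truncate_type_py_alt type_str num_of_chars
instance (type_str : String) (num_of_chars : Int) (out : String) : Decidable (Spec_truncate_type_py type_str num_of_chars out) := by unfold Spec_truncate_type_py; infer_instance

-- ===== CLAIM =====
def Claim_equal_truncate_type_py : Prop := ∀ (type_str : String) (num_of_chars : Int), Dom_truncate_type_py type_str num_of_chars → Spec_truncate_type_py type_str num_of_chars (truncate_type_py type_str num_of_chars)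

-- ===== LEMMAS AND PROOFS =====

-- ---- string/join basics ----
theorem pv_join_cons (p q : String) (suf : List String) :
    PySem.Str.join "." (p :: q :: suf) = p ++ "." ++ PySem.Str.join "." (q :: suf) := by
  apply String.toList_inj.mp
  simp [PySem.Str.toList_join, PySem.Chars.join_cons_cons]

theorem pv_join_singleton (p : String) : PySem.Str.join "." [p] = p := by
  apply String.toList_inj.mp
  simp [PySem.Str.toList_join, PySem.Chars.join_singleton]

theorem pv_len_append (s t : String) :
    PySem.Str.len (s ++ t) = PySem.Str.len s + PySem.Str.len t := by
  simp [PySem.Str.len_eq]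

-- ---- a reference model of the split/greedy side ----

-- the index loop: walk i leftward while the next part still fits; returns the final i
def pvBLoop (parts : List String) (n : Int) : Nat → Int → Nat
  | 0, _ => 0
  | i + 1, running =>
    let p := (PySem.List.pyGet? parts (i : Int)).getD ""
    if running + PySem.Str.len p + 1 ≤ n then pvBLoop parts n i (running + PySem.Str.len p + 1)
    else i + 1

-- A's accumulation loop computes the same split point as pvBLoop
theorem pv_loop_eq (n : Int) (pre : List String) : ∀ (suf : List String), suf ≠ [] →
    (if pvBLoop (pre ++ suf) n pre.length (PySem.Str.len (PySem.Str.join "." suf)) = 0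
     then PySem.Str.join "." (pre ++ suf)
     else "..." ++ PySem.Str.join "."
        ((pre ++ suf).drop (pvBLoop (pre ++ suf) n pre.length (PySem.Str.len (PySem.Str.join "." suf)))))
    = pvALoop n pre.reverse (PySem.Str.join "." suf) (PySem.Str.len (PySem.Str.join "." suf)) := by
  induction pre using List.reverseRecOn with
  | nil =>
    intro suf _
    simp [pvBLoop, pvALoop]
  | append_singleton pre' p ih =>
    intro suf hsuf
    obtain ⟨q, rest, rfl⟩ := List.exists_cons_of_ne_nil hsuf
    have hget : ((pre' ++ [p]) ++ (q :: rest))[pre'.length]? = some p := by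
      rw [List.append_assoc]
      rw [List.getElem?_append_right (by simp)]
      simp
    have hlen : (pre' ++ [p]).length = pre'.length + 1 := by simp
    have hjoin := pv_join_cons p q rest
    have harith : PySem.Str.len (PySem.Str.join "." (p :: q :: rest))
        = PySem.Str.len (PySem.Str.join "." (q :: rest)) + PySem.Str.len p + 1 := by
      rw [hjoin, pv_len_append, pv_len_append]
      simp [PySem.Str.len_eq]
      try omega
    by_cases hc : PySem.Str.len (PySem.Str.join "." (q :: rest)) + PySem.Str.len p + 1 ≤ n
    · have hB : pvBLoop ((pre' ++ [p]) ++ (q :: rest)) n (pre' ++ [p]).length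
            (PySem.Str.len (PySem.Str.join "." (q :: rest)))
          = pvBLoop (pre' ++ (p :: q :: rest)) n pre'.length
            (PySem.Str.len (PySem.Str.join "." (p :: q :: rest))) := by
        rw [hlen]
        simp only [pvBLoop, PySem.List.pyGet?_natCast, hget, Option.getD_some, if_pos hc]
        rw [List.append_assoc, ← harith, List.singleton_append]
      have hA : pvALoop n ((pre' ++ [p]).reverse) (PySem.Str.join "." (q :: rest))
            (PySem.Str.len (PySem.Str.join "." (q :: rest)))
          = pvALoop n pre'.reverse (PySem.Str.join "." (p :: q :: rest))
            (PySem.Str.len (PySem.Str.join "." (p :: q :: rest))) := by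
        rw [List.reverse_append]
        simp only [List.reverse_singleton, List.singleton_append, pvALoop,
          if_neg (by omega : ¬ PySem.Str.len (PySem.Str.join "." (q :: rest)) + PySem.Str.len p + 1 > n)]
        rw [← hjoin, ← harith]
      rw [hB, hA, List.append_assoc]
      exact ih (p :: q :: rest) (by simp)
    · have hB : pvBLoop ((pre' ++ [p]) ++ (q :: rest)) n (pre' ++ [p]).length
            (PySem.Str.len (PySem.Str.join "." (q :: rest))) = pre'.length + 1 := by
        rw [hlen]
        simp only [pvBLoop, PySem.List.pyGet?_natCast, hget, Option.getD_some, if_neg hc]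
      have hA : pvALoop n ((pre' ++ [p]).reverse) (PySem.Str.join "." (q :: rest))
            (PySem.Str.len (PySem.Str.join "." (q :: rest)))
          = "..." ++ PySem.Str.join "." (q :: rest) := by
        rw [List.reverse_append]
        simp only [List.reverse_singleton, List.singleton_append, pvALoop,
          if_pos (by omega : PySem.Str.len (PySem.Str.join "." (q :: rest)) + PySem.Str.len p + 1 > n)]
      rw [hB, hA, if_neg (by omega)]
      congr 1
      have : pre'.length + 1 = (pre' ++ [p]).length := by simp
      rw [this, List.drop_left]

-- ---- a structural model of splitOn on the one-char separator '.' ----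
def pvConsFst (x : List Char) : List (List Char) → List (List Char)
  | [] => [x]
  | p :: ps => (x ++ p) :: ps
def pvSplit : List Char → List (List Char)
  | [] => [[]]
  | c :: rest => if c = '.' then [] :: pvSplit rest else pvConsFst [c] (pvSplit rest)
theorem pvSplit_ne_nil (cs : List Char) : pvSplit cs ≠ [] := by
  induction cs with
  | nil => simp [pvSplit]
  | cons c rest ih =>
    by_cases h : c = '.'
    · simp [pvSplit, h]
    · simp only [pvSplit, if_neg h]
      cases hr : pvSplit rest with
      | nil => simp [pvConsFst]
      | cons p ps => simp [pvConsFst]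
theorem pv_splitOn_go_eq : ∀ (fuel : Nat) (l cur : List Char) (acc : List (List Char)),
    l.length ≤ fuel →
    PySem.Chars.splitOn.go ['.'] fuel l cur acc = acc.reverse ++ pvConsFst cur.reverse (pvSplit l) := by
  intro fuel
  induction fuel with
  | zero =>
    intro l cur acc h
    have : l = [] := by cases l <;> simp_all
    subst this
    simp [PySem.Chars.splitOn.go, pvSplit, pvConsFst]
  | succ fuel ih =>
    intro l cur acc h
    cases l with
    | nil => simp [PySem.Chars.splitOn.go, pvSplit, pvConsFst]
    | cons c rest =>
      by_cases hc : c = '.'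
      · subst hc
        have hpre : List.isPrefixOf ['.'] ('.' :: rest) = true := by simp [List.isPrefixOf]
        rw [show PySem.Chars.splitOn.go ['.'] (fuel+1) ('.'::rest) cur acc
              = PySem.Chars.splitOn.go ['.'] fuel (List.drop (['.'] : List Char).length ('.'::rest)) [] (cur.reverse :: acc) by
            simp [PySem.Chars.splitOn.go, hpre]]
        rw [ih _ _ _ (by simpa using Nat.le_of_succ_le_succ (by simpa using h))]
        simp only [pvSplit]
        cases hps : pvSplit rest with
        | nil => exact absurd hps (pvSplit_ne_nil rest)
        | cons p ps => simp [pvConsFst, hps]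
      · have hpre : List.isPrefixOf ['.'] (c :: rest) = false := by
          simp [List.isPrefixOf]; exact fun h' => hc h'.symm
        rw [show PySem.Chars.splitOn.go ['.'] (fuel+1) (c::rest) cur acc
              = PySem.Chars.splitOn.go ['.'] fuel rest (c :: cur) acc by
            simp [PySem.Chars.splitOn.go, hpre]]
        rw [ih _ _ _ (by simpa using Nat.le_of_succ_le_succ (by simpa using h))]
        simp only [pvSplit, if_neg hc]
        cases hps : pvSplit rest with
        | nil => exact absurd hps (pvSplit_ne_nil rest)
        | cons p ps => simp [pvConsFst, List.append_assoc]

theorem pv_splitOn_eq (cs : List Char) : PySem.Chars.splitOn cs ['.'] = pvSplit cs := by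
  rw [PySem.Chars.splitOn, pv_splitOn_go_eq _ _ _ _ (by omega)]
  cases hps : pvSplit cs with
  | nil => exact absurd hps (pvSplit_ne_nil cs)
  | cons p ps => simp [pvConsFst, hps]

theorem pv_cjoin_cons (p : List Char) (ps : List (List Char)) (h : ps ≠ []) :
    PySem.Chars.join ['.'] (p :: ps) = p ++ '.' :: PySem.Chars.join ['.'] ps := by
  obtain ⟨q, rest, rfl⟩ := List.exists_cons_of_ne_nil h
  rw [PySem.Chars.join_cons_cons]
  simp

theorem pvSplit_join (cs : List Char) : PySem.Chars.join ['.'] (pvSplit cs) = cs := by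
  induction cs with
  | nil => simp [pvSplit, PySem.Chars.join_singleton]
  | cons c rest ih =>
    by_cases h : c = '.'
    · subst h
      simp only [pvSplit]
      rw [if_pos trivial, pv_cjoin_cons _ _ (pvSplit_ne_nil rest), ih]
      simp
    · simp only [pvSplit, if_neg h]
      cases hps : pvSplit rest with
      | nil => exact absurd hps (pvSplit_ne_nil rest)
      | cons p ps =>
        rw [hps] at ih
        simp only [pvConsFst]
        cases ps with
        | nil =>
          rw [PySem.Chars.join_singleton] at ih ⊢
          simp [ih]
        | cons q qs =>
          rw [pv_cjoin_cons ([c]++p) (q::qs) (by simp)]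
          rw [pv_cjoin_cons p (q::qs) (by simp)] at ih
          simp [← ih]

theorem pvSplit_dotfree (cs : List Char) : ∀ p ∈ pvSplit cs, '.' ∉ p := by
  induction cs with
  | nil => simp [pvSplit]
  | cons c rest ih =>
    by_cases h : c = '.'
    · subst h
      simp only [pvSplit]
      rw [if_pos trivial]
      intro q hq
      rcases List.mem_cons.mp hq with rfl | hq
      · simp
      · exact ih q hq
    · simp only [pvSplit, if_neg h]
      cases hps : pvSplit rest with
      | nil => exact absurd hps (pvSplit_ne_nil rest)
      | cons p ps =>
        rw [hps] at ih
        simp only [pvConsFst]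
        intro q hq
        rcases List.mem_cons.mp hq with rfl | hq
        · intro hmem
          rcases List.mem_append.mp hmem with h' | h'
          · have hcc : '.' = c := by simpa using h'
            exact h hcc.symm
          · exact ih p (by simp) h'
        · exact ih q (List.mem_cons_of_mem _ hq)

def pvSIdx : List (List Char) → Nat → Nat
  | _, 0 => 0
  | [], _ + 1 => 0
  | p :: ps, k + 1 => p.length + 1 + pvSIdx ps k

theorem pvSIdx_mono (ps : List (List Char)) : ∀ k l : Nat, k ≤ l → pvSIdx ps k ≤ pvSIdx ps l := by
  induction ps with
  | nil => intro k l _; cases k <;> cases l <;> simp [pvSIdx]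
  | cons p ps ih =>
    intro k l hkl
    cases k with
    | zero => simp [pvSIdx]
    | succ k =>
      cases l with
      | zero => omega
      | succ l => simp only [pvSIdx]; have := ih k l (by omega); omega

theorem pvSIdx_drop (ps : List (List Char)) : ∀ k : Nat, k ≤ ps.length →
    (PySem.Chars.join ['.'] ps).drop (pvSIdx ps k) = PySem.Chars.join ['.'] (ps.drop k) := by
  induction ps with
  | nil => intro k hk; have hk0 : k = 0 := Nat.le_zero.mp hk; subst hk0; simp [pvSIdx]
  | cons p ps ih =>
    intro k hk
    cases k with
    | zero => simp [pvSIdx]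
    | succ k =>
      simp only [pvSIdx, List.drop_succ_cons]
      cases ps with
      | nil =>
        have : k = 0 := by simpa using hk
        subst this
        simp [pvSIdx, PySem.Chars.join_singleton, PySem.Chars.join_nil, List.drop_eq_nil_of_le]
      | cons q qs =>
        rw [pv_cjoin_cons _ _ (by simp)]
        rw [show p.length + 1 + pvSIdx (q::qs) k = (p ++ ['.']).length + pvSIdx (q::qs) k by
          simp only [List.length_append, List.length_cons, List.length_nil]]
        rw [show p ++ '.' :: PySem.Chars.join ['.'] (q::qs) = (p ++ ['.']) ++ PySem.Chars.join ['.'] (q::qs) by simp]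
        rw [List.drop_append, List.drop_eq_nil_of_le (by omega), Nat.add_sub_cancel_left,
          List.nil_append]
        exact ih k (by simpa using hk)

theorem pvSIdx_sum (ps : List (List Char)) : ∀ k : Nat, k < ps.length →
    pvSIdx ps k + (PySem.Chars.join ['.'] (ps.drop k)).length = (PySem.Chars.join ['.'] ps).length := by
  induction ps with
  | nil => intro k hk; simp at hk
  | cons p ps ih =>
    intro k hk
    cases k with
    | zero => simp [pvSIdx]
    | succ k =>
      simp only [pvSIdx, List.drop_succ_cons]
      have hps : ps ≠ [] := by
        intro h; subst h; simp at hk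
      rw [pv_cjoin_cons p ps hps]
      have := ih k (by simpa using hk)
      simp only [List.length_append, List.length_cons]
      omega

theorem pvSIdx_dot (ps : List (List Char)) : ∀ k : Nat, 1 ≤ k → k < ps.length →
    ∃ j : Nat, j + 1 = pvSIdx ps k ∧ (PySem.Chars.join ['.'] ps)[j]? = some '.' := by
  induction ps with
  | nil => intro k _ hk; simp at hk
  | cons p ps ih =>
    intro k hk1 hk2
    have hps : ps ≠ [] := by
      intro h; subst h; simp at hk2; omega
    rw [pv_cjoin_cons p ps hps]
    cases k with
    | zero => omega
    | succ k =>
      cases k with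
      | zero =>
        refine ⟨p.length, by simp [pvSIdx], ?_⟩
        rw [List.getElem?_append_right (by omega)]
        simp
      | succ k =>
        obtain ⟨j, hj1, hj2⟩ := ih (k+1) (by omega) (by simpa using hk2)
        refine ⟨p.length + 1 + j, by simp [pvSIdx]; omega, ?_⟩
        rw [List.getElem?_append_right (by omega)]
        rw [show p.length + 1 + j - p.length = j + 1 by omega]
        simpa using hj2

theorem pv_dot_complete (ps : List (List Char)) : (∀ p ∈ ps, '.' ∉ p) → ps ≠ [] →
    ∀ j : Nat, (PySem.Chars.join ['.'] ps)[j]? = some '.' →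
    ∃ k : Nat, 1 ≤ k ∧ k < ps.length ∧ j + 1 = pvSIdx ps k := by
  induction ps with
  | nil => intro _ h; exact absurd rfl h
  | cons p ps ih =>
    intro hdf _ j hj
    cases hps : ps with
    | nil =>
      subst hps
      rw [PySem.Chars.join_singleton] at hj
      exact absurd (List.mem_of_getElem? hj) (hdf p (by simp))
    | cons q qs =>
      subst hps
      rw [pv_cjoin_cons p _ (by simp)] at hj
      by_cases hjp : j < p.length
      · rw [List.getElem?_append_left hjp] at hj
        exact absurd (List.mem_of_getElem? hj) (hdf p (by simp))
      · rw [List.getElem?_append_right (by omega)] at hj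
        by_cases hje : j = p.length
        · exact ⟨1, by omega, by simp, by simp [pvSIdx, hje]⟩
        · have hj' : (PySem.Chars.join ['.'] (q :: qs))[j - p.length - 1]? = some '.' := by
            rw [show j - p.length = (j - p.length - 1) + 1 by omega] at hj
            simpa using hj
          obtain ⟨k, hk1, hk2, hk3⟩ := ih (fun r hr => hdf r (by simp [hr])) (by simp) _ hj'
          refine ⟨k + 1, by omega, by simpa using hk2, ?_⟩
          simp only [pvSIdx]
          omega

theorem pv_prefix_singleton (l : List Char) (a : Char) : [a] <+: l ↔ l.head? = some a := by
  constructor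
  · rintro ⟨t, rfl⟩; rfl
  · cases l with
    | nil => simp
    | cons b t => intro h; simp at h; exact ⟨t, by simp [h]⟩

theorem pv_infix_singleton (l : List Char) (a : Char) : [a] <:+: l ↔ a ∈ l := by
  constructor
  · intro h; exact h.mem (by simp)
  · intro h; obtain ⟨s, t, rfl⟩ := List.mem_iff_append.mp h; exact ⟨s, t, by simp⟩

theorem pv_rfind_go_zero (cs sub : List Char) :
    PySem.Chars.rfind.go cs sub 0 = if sub.isPrefixOf cs = true then (0:Int) else -1 := rfl

theorem pv_rfind_go_succ (cs sub : List Char) (k : Nat) :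
    PySem.Chars.rfind.go cs sub (k+1) =
      if sub.isPrefixOf (cs.drop (k+1)) = true then ((k+1 : Nat) : Int)
      else PySem.Chars.rfind.go cs sub k := rfl

theorem pv_findFrom_past (cs sub : List Char) (st : Int) (h1 : (cs.length : Int) < st) :
    PySem.Chars.findFrom cs sub st none = -1 := by
  have h0 : ¬ st < 0 := by omega
  change (if (cs.length : Int) < (if st < 0 then _ else st) then (-1:Int) else _) = -1
  rw [if_neg h0, if_pos h1]

theorem pv_isPrefixOf_dot (l : List Char) : List.isPrefixOf ['.'] l = true ↔ l.head? = some '.' := by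
  cases l with
  | nil => decide
  | cons b t =>
    rw [show List.isPrefixOf ['.'] (b :: t) = ('.' == b && List.isPrefixOf ([] : List Char) t) from rfl]
    rw [show List.isPrefixOf ([] : List Char) t = true from by cases t <;> rfl]
    simp only [Bool.and_true, beq_iff_eq, List.head?_cons, Option.some.injEq]
    exact eq_comm

theorem pv_rfind_go_none (cs : List Char) : ∀ k : Nat,
    (∀ j : Nat, j ≤ k → cs[j]? ≠ some '.') → PySem.Chars.rfind.go cs ['.'] k = -1 := by
  intro k
  induction k with
  | zero =>
    intro h
    have hpre : ¬ List.isPrefixOf ['.'] cs = true := by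
      rw [pv_isPrefixOf_dot, List.head?_eq_getElem?]
      exact h 0 (le_refl 0)
    rw [pv_rfind_go_zero, if_neg hpre]
  | succ k ih =>
    intro h
    have hk1 : ¬ List.isPrefixOf ['.'] (cs.drop (k+1)) = true := by
      rw [pv_isPrefixOf_dot, List.head?_drop]
      exact h (k+1) (le_refl _)
    rw [pv_rfind_go_succ, if_neg hk1]
    exact ih (fun j hj => h j (by omega))

theorem pv_rfind_go_max (cs : List Char) (j : Nat) (hj : cs[j]? = some '.') : ∀ k : Nat,
    j ≤ k → (∀ j' : Nat, j < j' → j' ≤ k → cs[j']? ≠ some '.') →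
    PySem.Chars.rfind.go cs ['.'] k = (j : Int) := by
  intro k
  induction k with
  | zero =>
    intro hjk _
    have hj0 : j = 0 := by omega
    subst hj0
    have hpre : List.isPrefixOf ['.'] cs = true := by
      rw [pv_isPrefixOf_dot, List.head?_eq_getElem?]
      exact hj
    rw [pv_rfind_go_zero, if_pos hpre]
    simp
  | succ k ih =>
    intro hjk hno
    by_cases hje : j = k + 1
    · subst hje
      have hpre : List.isPrefixOf ['.'] (cs.drop (k+1)) = true := by
        rw [pv_isPrefixOf_dot, List.head?_drop]; exact hj
      rw [pv_rfind_go_succ, if_pos hpre]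
    · have hk1 : ¬ List.isPrefixOf ['.'] (cs.drop (k+1)) = true := by
        rw [pv_isPrefixOf_dot, List.head?_drop]
        exact hno (k+1) (by omega) (le_refl _)
      rw [pv_rfind_go_succ, if_neg hk1]
      exact ih (by omega) (fun j' h1 h2 => hno j' h1 (by omega))

theorem pv_SL_step (parts : List String) (i : Nat) (h : i + 1 < parts.length) :
    PySem.Str.len (PySem.Str.join "." (parts.drop i)) =
    PySem.Str.len (PySem.Str.join "." (parts.drop (i+1))) +
      PySem.Str.len ((PySem.List.pyGet? parts (i : Int)).getD "") + 1 := by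
  have hget : (PySem.List.pyGet? parts (i : Int)).getD "" = parts[i]'(by omega) := by
    rw [PySem.List.pyGet?_natCast, List.getElem?_eq_getElem (by omega)]
    rfl
  have hdrop : parts.drop i = parts[i]'(by omega) :: parts.drop (i+1) :=
    List.drop_eq_getElem_cons (by omega)
  obtain ⟨q, rest, hqr⟩ : ∃ q rest, parts.drop (i+1) = q :: rest := by
    have : parts.drop (i+1) ≠ [] := by
      simp [List.drop_eq_nil_iff]; omega
    exact List.exists_cons_of_ne_nil this
  rw [hget, hdrop, hqr, pv_join_cons, pv_len_append, pv_len_append]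
  have : PySem.Str.len "." = 1 := by decide
  rw [this]
  omega

theorem pv_loop_char (parts : List String) (n : Int) : ∀ i : Nat, i + 1 ≤ parts.length →
    pvBLoop parts n i (PySem.Str.len (PySem.Str.join "." (parts.drop i))) ≤ i ∧
    (pvBLoop parts n i (PySem.Str.len (PySem.Str.join "." (parts.drop i))) = i ∨
      PySem.Str.len (PySem.Str.join "." (parts.drop
        (pvBLoop parts n i (PySem.Str.len (PySem.Str.join "." (parts.drop i)))))) ≤ n) ∧
    (pvBLoop parts n i (PySem.Str.len (PySem.Str.join "." (parts.drop i))) = 0 ∨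
      ¬ PySem.Str.len (PySem.Str.join "." (parts.drop
        (pvBLoop parts n i (PySem.Str.len (PySem.Str.join "." (parts.drop i))) - 1))) ≤ n) := by
  intro i
  induction i with
  | zero => intro _; simp [pvBLoop]
  | succ i ih =>
    intro hlen
    by_cases hc : PySem.Str.len (PySem.Str.join "." (parts.drop (i+1)))
        + PySem.Str.len ((PySem.List.pyGet? parts (i : Int)).getD "") + 1 ≤ n
    · have hstep := pv_SL_step parts i (by omega)
      have hred : pvBLoop parts n (i+1) (PySem.Str.len (PySem.Str.join "." (parts.drop (i+1))))
          = pvBLoop parts n i (PySem.Str.len (PySem.Str.join "." (parts.drop i))) := by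
        simp only [pvBLoop, if_pos hc]
        rw [hstep]
      rw [hred]
      obtain ⟨h1, h2, h3⟩ := ih (by omega)
      refine ⟨by omega, ?_, h3⟩
      rcases h2 with h2 | h2
      · right; rw [h2, hstep]; exact hc
      · right; exact h2
    · have hstep := pv_SL_step parts i (by omega)
      have hred : pvBLoop parts n (i+1) (PySem.Str.len (PySem.Str.join "." (parts.drop (i+1))))
          = i + 1 := by
        simp only [pvBLoop, if_neg hc]
      rw [hred]
      refine ⟨le_refl _, Or.inl rfl, Or.inr ?_⟩
      simp only [Nat.add_sub_cancel]
      rw [hstep]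
      omega

-- ===== VERDICT =====
theorem truncate_type_py_spec : Claim_equal_truncate_type_py := by
  intro s n _
  unfold Spec_truncate_type_py truncate_type_py truncate_type_py_alt
  by_cases h0 : PySem.Str.len s < n
  · rw [if_pos h0, if_pos h0]
  · rw [if_neg h0, if_neg h0]
    show pvALoop n (PySem.List.slice ((PySem.Str.split? s ".").getD []) none (some (-1))).reverse
        ((PySem.List.pyGet? ((PySem.Str.split? s ".").getD []) (-1)).getD "")
        (PySem.Str.len ((PySem.List.pyGet? ((PySem.Str.split? s ".").getD []) (-1)).getD ""))
      = (if PySem.Str.len s ≤ n then s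
         else if PySem.Str.findFrom s "." (PySem.Str.len s - n - 1) < 0 then
           (if PySem.Str.rfind s "." < 0 then s
            else "..." ++ PySem.Str.slice s (some (PySem.Str.rfind s "." + 1)))
         else "..." ++ PySem.Str.slice s (some (PySem.Str.findFrom s "." (PySem.Str.len s - n - 1) + 1)))
    have hdotlist : (".".toList) = ['.'] := rfl
    have hsplit : (PySem.Str.split? s ".").getD []
        = (pvSplit s.toList).map String.ofList := by
      rw [PySem.Str.split?, hdotlist, PySem.Chars.split?]
      rw [if_neg (by simp)]
      simp [pv_splitOn_eq]
    set cs := s.toList with hcs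
    set ps := pvSplit cs with hps
    set P : List String := ps.map String.ofList with hP
    have hPlen : P.length = ps.length := by simp [hP]
    have hpsnil : ps ≠ [] := pvSplit_ne_nil cs
    have hm1 : 1 ≤ ps.length := by
      cases hq : ps with
      | nil => exact absurd hq hpsnil
      | cons a l => simp
    have hcseq : PySem.Chars.join ['.'] ps = cs := pvSplit_join cs
    have hdf : ∀ p ∈ ps, '.' ∉ p := pvSplit_dotfree cs
    have hPdrop : ∀ k : Nat, (P.drop k).map String.toList = ps.drop k := by
      intro k
      rw [hP, ← List.map_drop, List.map_map]
      have : (String.toList ∘ String.ofList) = id := by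
        funext l; simp
      rw [this, List.map_id]
    have hJoinToList : ∀ k : Nat,
        (PySem.Str.join "." (P.drop k)).toList = PySem.Chars.join ['.'] (ps.drop k) := by
      intro k
      rw [PySem.Str.toList_join, hdotlist, hPdrop]
    have hSL : ∀ k : Nat, k < ps.length →
        PySem.Str.len (PySem.Str.join "." (P.drop k)) = (cs.length : Int) - (pvSIdx ps k : Int) := by
      intro k hk
      rw [PySem.Str.len_eq, hJoinToList]
      have h1 := pvSIdx_sum ps k hk
      rw [hcseq] at h1
      omega
    have hL : PySem.Str.len s = (cs.length : Int) := by rw [PySem.Str.len_eq]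
    -- decompose P as pre ++ [last]
    rcases List.eq_nil_or_concat P with hnil | ⟨pre, last, hcat⟩
    · exfalso
      rw [hnil] at hPlen
      simp at hPlen
      omega
    simp only [List.concat_eq_append] at hcat
    have hslice : PySem.List.slice P none (some (-1)) = pre := by
      rw [hcat, PySem.List.slice_to_neg_one]; simp
    have hlastget : (PySem.List.pyGet? P (-1)).getD "" = last := by
      rw [hcat]; simp [PySem.List.pyGet?, PySem.List.pyIdx?]
    have hmP : P.length = pre.length + 1 := by rw [hcat]; simp
    have hdropPre : P.drop pre.length = [last] := by
      rw [hcat, List.drop_left]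
    have hlastlen : PySem.Str.len (PySem.Str.join "." (P.drop pre.length)) = PySem.Str.len last := by
      rw [hdropPre, pv_join_singleton]
    -- A's value via the loop correspondence
    have hloop := pv_loop_eq n pre [last] (by simp)
    rw [pv_join_singleton, ← hcat] at hloop
    rw [hsplit, hslice, hlastget, ← hloop]
    -- characterise the split index
    set r := pvBLoop P n pre.length (PySem.Str.len last) with hr
    have hrarg : pvBLoop P n pre.length (PySem.Str.len (PySem.Str.join "." (P.drop pre.length))) = r := by
      rw [hlastlen]
    obtain ⟨hr1, hr2, hr3⟩ := pv_loop_char P n pre.length (by omega)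
    rw [hrarg] at hr1 hr2 hr3
    have hrm : r < ps.length := by omega
    by_cases hLn : PySem.Str.len s ≤ n
    · -- everything fits: the loop runs to index 0 and rebuilds the whole string
      rw [if_pos hLn]
      have hr0 : r = 0 := by
        by_contra hne
        rcases hr3 with h | h
        · exact hne h
        · apply h
          rw [hSL (r-1) (by omega)]
          have := pvSIdx_mono ps 0 (r-1) (by omega)
          rw [hL] at hLn
          simp [pvSIdx] at this
          omega
      rw [if_pos hr0]
      apply String.toList_inj.mp
      have h00 := hJoinToList 0
      simp only [List.drop_zero] at h00
      rw [h00, hcseq]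
    · -- truncation needed
      rw [if_neg hLn]
      have hLn' : n < (cs.length : Int) := by rw [hL] at h0 hLn; omega
      have hs0 : (0:Int) ≤ PySem.Str.len s - n - 1 := by rw [hL]; omega
      by_cases hrz : r = 0
      · -- single component: there is no dot anywhere, both sides return the string
        have hm1' : ps.length = 1 := by
          rcases hr2 with h | h
          · omega
          · exfalso
            rw [hrz] at h
            rw [hSL 0 (by omega)] at h
            simp [pvSIdx] at h
            omega
        have hnodot : ∀ j : Nat, cs[j]? ≠ some '.' := by
          intro j hdot
          obtain ⟨k, hk1, hk2, _⟩ := pv_dot_complete ps hdf hpsnil j (by rw [hcseq]; exact hdot)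
          omega
        have hmem : '.' ∉ cs := by
          intro h
          obtain ⟨j, hj⟩ := List.mem_iff_getElem?.mp h
          exact hnodot j hj
        have hfind : PySem.Str.findFrom s "." (PySem.Str.len s - n - 1) = -1 := by
          rw [PySem.Str.findFrom_eq, hdotlist, ← hcs]
          by_cases hin : PySem.Str.len s - n - 1 ≤ (cs.length : Int)
          · have hk0 : PySem.Str.len s - n - 1 = ((PySem.Str.len s - n - 1).toNat : Int) := by omega
            rw [hk0]
            rw [PySem.Chars.findFrom_natCast_eq_neg_one_iff cs ['.'] _ (by omega)]
            rw [pv_infix_singleton]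
            intro hmem'
            exact hmem (List.mem_of_mem_drop hmem')
          · exact pv_findFrom_past cs ['.'] _ (by omega)
        have hrf : PySem.Str.rfind s "." = -1 := by
          rw [PySem.Str.rfind, hdotlist, ← hcs, PySem.Chars.rfind]
          exact pv_rfind_go_none cs cs.length (fun j _ => hnodot j)
        rw [if_pos hrz, hfind, if_pos (show (-1:Int) < 0 by norm_num), hrf,
          if_pos (show (-1:Int) < 0 by norm_num)]
        apply String.toList_inj.mp
        have h00 := hJoinToList 0
        simp only [List.drop_zero] at h00
        rw [h00, hcseq]
      · -- r ≥ 1: result is '...' plus the suffix starting at character index pvSIdx ps r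
        have hrge : 1 ≤ r := by omega
        have hnotfit : ¬ PySem.Str.len (PySem.Str.join "." (P.drop (r-1))) ≤ n := by
          rcases hr3 with h | h
          · omega
          · exact h
        obtain ⟨jr, hjr1, hjr2⟩ := pvSIdx_dot ps r hrge hrm
        rw [hcseq] at hjr2
        have hjrlt : jr < cs.length := (List.getElem?_eq_some_iff.mp hjr2).1
        rw [if_neg hrz]
        by_cases hfit : PySem.Str.len (PySem.Str.join "." (P.drop r)) ≤ n
        · -- the minimal fitting suffix exists: find locates its leading dot jr
          have hn0 : (0:Int) ≤ n := by
            have hge : (0:Int) ≤ PySem.Str.len (PySem.Str.join "." (P.drop r)) := by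
              rw [PySem.Str.len_eq]; positivity
            omega
          have hfit' : (cs.length : Int) - n ≤ (jr:Int) + 1 := by
            rw [hSL r hrm] at hfit
            omega
          have hmin : ∀ j : Nat, cs[j]? = some '.' →
              PySem.Str.len s - n - 1 ≤ (j:Int) → jr ≤ j := by
            intro j hdot hge
            obtain ⟨k, hk1, hk2, hk3⟩ := pv_dot_complete ps hdf hpsnil j (by rw [hcseq]; exact hdot)
            by_cases hkr : k ≤ r - 1
            · exfalso
              have hmono := pvSIdx_mono ps k (r-1) hkr
              have hbad : ¬ (cs.length : Int) - (pvSIdx ps (r-1) : Int) ≤ n := by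
                rw [← hSL (r-1) (by omega)]
                exact hnotfit
              rw [hL] at hge
              omega
            · have hmono := pvSIdx_mono ps r k (by omega)
              omega
          set k0 : Nat := (PySem.Str.len s - n - 1).toNat with hk0
          have hk0cast : ((k0:Nat) : Int) = PySem.Str.len s - n - 1 := by
            rw [hk0]; omega
          have hk0le : k0 ≤ cs.length := by
            rw [hL] at hk0cast; omega
          have hjrk0 : k0 ≤ jr := by
            have h1 : ((k0:Nat):Int) ≤ (jr:Int) := by rw [hk0cast, hL]; omega
            exact_mod_cast h1
          have hmemdrop : '.' ∈ cs.drop k0 := by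
            apply List.mem_iff_getElem?.mpr
            refine ⟨jr - k0, ?_⟩
            rw [List.getElem?_drop, show k0 + (jr - k0) = jr by omega]
            exact hjr2
          have hinf : ['.'] <:+: cs.drop k0 := (pv_infix_singleton _ _).mpr hmemdrop
          set f := PySem.Chars.find (cs.drop k0) ['.'] with hf
          have hf0 : (0:Int) ≤ f := (PySem.Chars.find_nonneg_iff _ _).mpr hinf
          obtain ⟨hpre, hminf⟩ := PySem.Chars.find_spec hf0
          have hdotf : cs[k0 + f.toNat]? = some '.' := by
            have h1 := (pv_prefix_singleton _ _).mp hpre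
            rw [List.head?_drop, List.getElem?_drop] at h1
            exact h1
          have hjreq : k0 + f.toNat = jr := by
            have hge : jr ≤ k0 + f.toNat := hmin _ hdotf (by rw [← hk0cast]; push_cast; omega)
            by_contra hne
            have hlt : jr - k0 < f.toNat := by omega
            refine hminf (jr - k0) hlt ((pv_prefix_singleton _ _).mpr ?_)
            rw [List.head?_drop, List.getElem?_drop, show k0 + (jr - k0) = jr by omega]
            exact hjr2
          have hd : PySem.Str.findFrom s "." (PySem.Str.len s - n - 1) = (jr : Int) := by
            rw [PySem.Str.findFrom_eq, hdotlist, ← hcs, ← hk0cast]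
            rw [PySem.Chars.findFrom_natCast cs ['.'] k0 hk0le, ← hf]
            rw [if_neg (by omega)]
            omega
          rw [hd, if_neg (by omega)]
          apply String.toList_inj.mp
          rw [String.toList_append, String.toList_append, hJoinToList r, PySem.Str.toList_slice]
          congr 1
          rw [show PySem.Chars.slice cs (some ((jr:Int) + 1)) none = cs.drop ((jr:Int)+1).toNat from by
            rw [PySem.Chars.slice_eq_listSlice]
            exact PySem.List.slice_from cs (by positivity)]
          rw [show ((jr:Int)+1).toNat = jr + 1 by omega, hjr1, ← hcseq]
          exact (pvSIdx_drop ps r (by omega)).symm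
        · -- nothing fits: find misses, rfind picks the dot before the last component
          have hreq : r = pre.length := by
            rcases hr2 with h | h
            · exact h
            · exact absurd h hfit
          have hallnofit : ∀ k : Nat, k < ps.length → ¬ (cs.length:Int) - (pvSIdx ps k : Int) ≤ n := by
            intro k hk hle
            have hmono := pvSIdx_mono ps k r (by omega)
            rw [hSL r hrm] at hfit
            omega
          have hdotlt : ∀ j : Nat, cs[j]? = some '.' → (j:Int) < PySem.Str.len s - n - 1 := by
            intro j hdot
            obtain ⟨k, hk1, hk2, hk3⟩ := pv_dot_complete ps hdf hpsnil j (by rw [hcseq]; exact hdot)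
            have := hallnofit k hk2
            rw [hL]
            omega
          have hfind : PySem.Str.findFrom s "." (PySem.Str.len s - n - 1) = -1 := by
            rw [PySem.Str.findFrom_eq, hdotlist, ← hcs]
            by_cases hin : PySem.Str.len s - n - 1 ≤ (cs.length : Int)
            · have hk0 : PySem.Str.len s - n - 1 = ((PySem.Str.len s - n - 1).toNat : Int) := by omega
              rw [hk0]
              rw [PySem.Chars.findFrom_natCast_eq_neg_one_iff cs ['.'] _ (by omega)]
              rw [pv_infix_singleton]
              intro hmem'
              obtain ⟨i, hi⟩ := List.mem_iff_getElem?.mp hmem'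
              rw [List.getElem?_drop] at hi
              have h1 := hdotlt _ hi
              omega
            · exact pv_findFrom_past cs ['.'] _ (by omega)
          have hmax : ∀ j' : Nat, jr < j' → j' ≤ cs.length → cs[j']? ≠ some '.' := by
            intro j' h1 h2 hdot
            obtain ⟨k, hk1, hk2, hk3⟩ := pv_dot_complete ps hdf hpsnil j' (by rw [hcseq]; exact hdot)
            have hmono := pvSIdx_mono ps k r (by omega)
            omega
          have hrf : PySem.Str.rfind s "." = (jr : Int) := by
            rw [PySem.Str.rfind, hdotlist, ← hcs, PySem.Chars.rfind]
            exact pv_rfind_go_max cs jr hjr2 cs.length (by omega) hmax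
          rw [hfind, if_pos (show (-1:Int) < 0 by norm_num), hrf, if_neg (by omega)]
          apply String.toList_inj.mp
          rw [String.toList_append, String.toList_append, hJoinToList r, PySem.Str.toList_slice]
          congr 1
          rw [show PySem.Chars.slice cs (some ((jr:Int) + 1)) none = cs.drop ((jr:Int)+1).toNat from by
            rw [PySem.Chars.slice_eq_listSlice]
            exact PySem.List.slice_from cs (by positivity)]
          rw [show ((jr:Int)+1).toNat = jr + 1 by omega, hjr1, ← hcseq]
          exact (pvSIdx_drop ps r (by omega)).symm
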